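-- pv_equiv track=rewrite | github.com/techthumb1/Agentic-Writer-LangGraph | langgraph_app/agents/enhanced_formatter.py | _apply_inline_styles
-- ===== SOURCE A (Python) =====
-- def _apply_inline_styles(html_content: str) -> str:
--     """Apply inline CSS styles for email compatibility"""
--
--     # Define inline styles
--     styles = {
--         'h1': 'font-size: 24px; font-weight: bold; margin: 20px 0 10px 0; color: #333;',
--         'h2': 'font-size: 20px; font-weight: bold; margin: 18px 0 8px 0; color: #444;',
--         'h3': 'font-size: 18px; font-weight: bold; margin: 16px 0 6px 0; color: #555;',
--         'p': 'margin: 10px 0; line-height: 1.6;',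
--         'ul': 'margin: 10px 0; padding-left: 20px;',
--         'ol': 'margin: 10px 0; padding-left: 20px;',
--         'li': 'margin: 5px 0;',
--         'a': 'color: #007cba; text-decoration: none;',
--         'strong': 'font-weight: bold;',
--         'em': 'font-style: italic;',
--         'code': 'background-color: #f4f4f4; padding: 2px 4px; font-family: monospace;'
--     }
--
--     # Apply inline styles
--     for tag, style in styles.items():
--         pattern = f'<{tag}>'
--         replacement = f'<{tag} style="{style}">'
--         html_content = html_content.replace(pattern, replacement)
--
--     return html_content
-- ===== SOURCE B (Python) =====
-- # Single left-to-right pass: at each position try the tag patterns in order and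
-- # splice in the styled tag, instead of A's eleven sequential full-string .replace() scans.
-- _STYLES = (
--     ('h1', 'font-size: 24px; font-weight: bold; margin: 20px 0 10px 0; color: #333;'),
--     ('h2', 'font-size: 20px; font-weight: bold; margin: 18px 0 8px 0; color: #444;'),
--     ('h3', 'font-size: 18px; font-weight: bold; margin: 16px 0 6px 0; color: #555;'),
--     ('p', 'margin: 10px 0; line-height: 1.6;'),
--     ('ul', 'margin: 10px 0; padding-left: 20px;'),
--     ('ol', 'margin: 10px 0; padding-left: 20px;'),
--     ('li', 'margin: 5px 0;'),
--     ('a', 'color: #007cba; text-decoration: none;'),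
--     ('strong', 'font-weight: bold;'),
--     ('em', 'font-style: italic;'),
--     ('code', 'background-color: #f4f4f4; padding: 2px 4px; font-family: monospace;'),
-- )
--
-- _TABLE = tuple((f'<{tag}>', f'<{tag} style="{style}">') for tag, style in _STYLES)
--
--
-- def _apply_inline_styles(html_content: str) -> str:
--     """Apply inline CSS styles for email compatibility (single-pass version)."""
--     out = []
--     i = 0
--     n = len(html_content)
--     while i < n:
--         for pattern, replacement in _TABLE:
--             if html_content.startswith(pattern, i):
--                 out.append(replacement)
--                 i += len(pattern)
--                 break
--         else:
--             out.append(html_content[i])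
--             i += 1
--     return ''.join(out)
-- ===== Notes on version B (the rewrite author's own statement) =====
-- stated objective: alternative
-- what changed: Replaces A's eleven sequential full-string str.replace passes by a single left-to-right scan that, at each position, tries the eleven literal tag patterns in order and splices in the styled tag.
import Mathlib
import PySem

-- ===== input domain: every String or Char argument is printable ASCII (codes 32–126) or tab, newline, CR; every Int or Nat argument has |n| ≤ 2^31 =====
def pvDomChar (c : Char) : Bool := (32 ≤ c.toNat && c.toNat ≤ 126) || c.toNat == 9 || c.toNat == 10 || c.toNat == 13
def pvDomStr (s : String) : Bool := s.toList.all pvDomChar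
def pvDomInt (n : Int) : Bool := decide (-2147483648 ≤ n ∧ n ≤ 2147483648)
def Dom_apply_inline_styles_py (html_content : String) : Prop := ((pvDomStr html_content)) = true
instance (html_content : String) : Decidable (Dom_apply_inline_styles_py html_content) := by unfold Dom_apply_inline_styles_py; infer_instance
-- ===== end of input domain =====

-- B replaces A's eleven sequential full-string .replace passes by ONE left-to-right pass that
-- tries the tag patterns in order at each position (objective: alternative single-pass algorithm).

-- ===== PORT A =====
-- A's literal styles dict (insertion order kept by PySem.Dict)
def pvStylesA : PySem.Dict String String := PySem.Dict.ofList
  [ ("h1", "font-size: 24px; font-weight: bold; margin: 20px 0 10px 0; color: #333;")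
  , ("h2", "font-size: 20px; font-weight: bold; margin: 18px 0 8px 0; color: #444;")
  , ("h3", "font-size: 18px; font-weight: bold; margin: 16px 0 6px 0; color: #555;")
  , ("p", "margin: 10px 0; line-height: 1.6;")
  , ("ul", "margin: 10px 0; padding-left: 20px;")
  , ("ol", "margin: 10px 0; padding-left: 20px;")
  , ("li", "margin: 5px 0;")
  , ("a", "color: #007cba; text-decoration: none;")
  , ("strong", "font-weight: bold;")
  , ("em", "font-style: italic;")
  , ("code", "background-color: #f4f4f4; padding: 2px 4px; font-family: monospace;") ]

-- for tag, style in styles.items(): html_content = html_content.replace(f'<{tag}>', f'<{tag} style="{style}">')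
def apply_inline_styles_py (html_content : String) : String :=
  pvStylesA.items.foldl
    (fun h ts => PySem.Str.replace h ("<" ++ ts.1 ++ ">") ("<" ++ ts.1 ++ " style=\"" ++ ts.2 ++ "\">"))
    html_content

-- ===== PORT B =====
-- B's module-level _STYLES tuple
def pvStylesB : List (String × String) :=
  [ ("h1", "font-size: 24px; font-weight: bold; margin: 20px 0 10px 0; color: #333;")
  , ("h2", "font-size: 20px; font-weight: bold; margin: 18px 0 8px 0; color: #444;")
  , ("h3", "font-size: 18px; font-weight: bold; margin: 16px 0 6px 0; color: #555;")
  , ("p", "margin: 10px 0; line-height: 1.6;")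
  , ("ul", "margin: 10px 0; padding-left: 20px;")
  , ("ol", "margin: 10px 0; padding-left: 20px;")
  , ("li", "margin: 5px 0;")
  , ("a", "color: #007cba; text-decoration: none;")
  , ("strong", "font-weight: bold;")
  , ("em", "font-style: italic;")
  , ("code", "background-color: #f4f4f4; padding: 2px 4px; font-family: monospace;") ]

-- B's module-level _TABLE of (pattern, replacement) pairs, held as char lists for the scan
def pvTableB : List (List Char × List Char) :=
  pvStylesB.map (fun ts =>
    (("<" ++ ts.1 ++ ">").toList, ("<" ++ ts.1 ++ " style=\"" ++ ts.2 ++ "\">").toList))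

-- the inner `for pattern, replacement in _TABLE: if html_content.startswith(pattern, i): … break / else: …`
def pvFirst (l : List Char) : List (List Char × List Char) → Option (List Char × List Char)
  | [] => none
  | pr :: rest => if pr.1.isPrefixOf l then some pr else pvFirst l rest

theorem pvFirst_some {l : List Char} {tab : List (List Char × List Char)}
    {pr : List Char × List Char} (h : pvFirst l tab = some pr) :
    pr ∈ tab ∧ pr.1 <+: l := by
  induction tab with
  | nil => simp [pvFirst] at h
  | cons q rest ih =>
    by_cases hq : q.1.isPrefixOf l
    · simp [pvFirst, hq] at h
      subst h
      exact ⟨List.mem_cons_self, List.isPrefixOf_iff_prefix.mp hq⟩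
    · simp [pvFirst, hq] at h
      rcases ih h with ⟨h1, h2⟩
      exact ⟨List.mem_cons_of_mem _ h1, h2⟩

-- every pattern of _TABLE is nonempty (needed for the scan to terminate)
theorem pvTableB_pat_len : ∀ pr ∈ pvTableB, 2 ≤ pr.1.length := by decide

-- B's `while i < n` scan: emit the first matching replacement and skip the pattern, else copy the char
def pvScan : List Char → List Char
  | [] => []
  | c :: t =>
    match h : pvFirst (c :: t) pvTableB with
    | some pr => pr.2 ++ pvScan (List.drop pr.1.length (c :: t))
    | none => c :: pvScan t
termination_by l => l.length
decreasing_by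
  · rcases pvFirst_some h with ⟨hmem, _⟩
    have h2 := pvTableB_pat_len _ hmem
    simp [List.length_drop]
    omega
  · simp

def apply_inline_styles_py_alt (html_content : String) : String :=
  String.ofList (pvScan html_content.toList)

-- ===== PRECONDITION & SPEC =====
def Spec_apply_inline_styles_py (html_content : String) (out : String) : Prop := out = apply_inline_styles_py_alt html_content
instance (html_content : String) (out : String) : Decidable (Spec_apply_inline_styles_py html_content out) := by unfold Spec_apply_inline_styles_py; infer_instance

-- ===== CLAIM (what is proved, stated in full; the proofs are below) =====
def Claim_equal_apply_inline_styles_py : Prop := ∀ (html_content : String), Dom_apply_inline_styles_py html_content → Spec_apply_inline_styles_py html_content (apply_inline_styles_py html_content)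

-- ===== LEMMAS AND PROOFS =====

-- one str.replace, written as a structural scan (proved equal to PySem.Chars.replace below)
def pvRepl (old new : List Char) : List Char → List Char
  | [] => []
  | c :: t =>
    if old.isPrefixOf (c :: t) && !old.isEmpty then
      new ++ pvRepl old new (List.drop old.length (c :: t))
    else
      c :: pvRepl old new t
termination_by l => l.length
decreasing_by
  · rename_i hcond
    simp at hcond
    have : old.length ≠ 0 := by simpa [List.isEmpty_iff, List.length_eq_zero_iff] using hcond.2
    simp [List.length_drop]
    omega
  · simp

theorem go_eq_pvRepl (old new : List Char) (hold : old ≠ []) :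
    ∀ (fuel : Nat) (l acc : List Char), l.length ≤ fuel →
      PySem.Chars.replace.go old new fuel l acc = acc.reverse ++ pvRepl old new l := by
  intro fuel
  induction fuel with
  | zero =>
    intro l acc hl
    have : l = [] := by
      cases l with
      | nil => rfl
      | cons c t => simp at hl
    subst this
    simp [PySem.Chars.replace.go, pvRepl]
  | succ fuel ih =>
    intro l acc hl
    cases l with
    | nil => simp [PySem.Chars.replace.go, pvRepl]
    | cons c t =>
      have hne : old.isEmpty = false := by simpa [List.isEmpty_iff] using hold
      by_cases hpre : old.isPrefixOf (c :: t)
      · have hlen : 1 ≤ old.length := by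
          cases old with
          | nil => exact absurd rfl hold
          | cons _ _ => simp
        have hdrop : (List.drop old.length (c :: t)).length ≤ fuel := by
          simp [List.length_drop]
          simp at hl
          omega
        rw [show PySem.Chars.replace.go old new (fuel+1) (c::t) acc
            = PySem.Chars.replace.go old new fuel (List.drop old.length (c::t)) (new.reverse ++ acc) by
          simp [PySem.Chars.replace.go, hpre]]
        rw [ih _ _ hdrop]
        rw [show pvRepl old new (c :: t) = new ++ pvRepl old new (List.drop old.length (c :: t)) by
          rw [pvRepl]; simp [hpre, hne]]
        simp
      · rw [show PySem.Chars.replace.go old new (fuel+1) (c::t) acc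
            = PySem.Chars.replace.go old new fuel t (c :: acc) by
          simp [PySem.Chars.replace.go, hpre]]
        have hlt : t.length ≤ fuel := by simp at hl; omega
        rw [ih _ _ hlt]
        rw [show pvRepl old new (c :: t) = c :: pvRepl old new t by
          rw [pvRepl]; simp [hpre]]
        simp

theorem replace_eq_pvRepl (old new s : List Char) (hold : old ≠ []) :
    PySem.Chars.replace s old new = pvRepl old new s := by
  have hne : old.isEmpty = false := by simpa [List.isEmpty_iff] using hold
  rw [PySem.Chars.replace, hne]
  simpa using go_eq_pvRepl old new hold s.length s [] le_rfl

theorem pvRepl_nil (p r : List Char) : pvRepl p r [] = [] := by rw [pvRepl]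

theorem pvRepl_cons_neg (p r : List Char) (c : Char) (t : List Char) (h : ¬ p <+: c :: t) :
    pvRepl p r (c :: t) = c :: pvRepl p r t := by
  rw [pvRepl]
  have : p.isPrefixOf (c :: t) = false := by
    rw [Bool.eq_false_iff]
    intro hb
    exact h (List.isPrefixOf_iff_prefix.mp hb)
  simp [this]

theorem pvRepl_cons_pos (p r : List Char) (c : Char) (t : List Char) (hp : p ≠ [])
    (h : p <+: c :: t) :
    pvRepl p r (c :: t) = r ++ pvRepl p r (List.drop p.length (c :: t)) := by
  rw [pvRepl]
  have h1 : p.isPrefixOf (c :: t) = true := List.isPrefixOf_iff_prefix.mpr h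
  have h2 : p.isEmpty = false := by simpa [List.isEmpty_iff] using hp
  simp [h1, h2]

theorem pvRepl_skip (p r : List Char) (hp : p.head? = some '<') :
    ∀ (u v : List Char), '<' ∉ u → pvRepl p r (u ++ v) = u ++ pvRepl p r v := by
  intro u
  induction u with
  | nil => simp
  | cons c u ih =>
    intro v hu
    have hc : c ≠ '<' := by
      intro h; exact hu (h ▸ List.mem_cons_self)
    have hnp : ¬ p <+: c :: (u ++ v) := by
      intro hpre
      cases p with
      | nil => simp at hp
      | cons p0 pt =>
        have : p0 = c := (List.cons_prefix_cons.mp hpre).1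
        simp at hp
        exact hc (by rw [← this, hp])
    rw [List.cons_append, pvRepl_cons_neg _ _ _ _ hnp,
        ih v (fun h => hu (List.mem_cons_of_mem _ h))]
    simp

theorem pvRepl_newhead (p r : List Char) (hp : p ≠ []) (hr : r.head? = some '<') :
    ∀ (n : Nat) (t s : List Char), t.length ≤ n → s ≠ [] → '<' ∉ s → ¬ s <+: t → ¬ s <+: pvRepl p r t := by
  intro n
  induction n with
  | zero =>
    intro t s hn hs hsl hst
    have : t = [] := by cases t with | nil => rfl | cons _ _ => simp at hn
    subst this
    simpa [pvRepl_nil] using hst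
  | succ n ih =>
    intro t s hn hs hsl hst
    cases t with
    | nil => simpa [pvRepl_nil] using hst
    | cons c t' =>
      by_cases hpre : p <+: c :: t'
      · rw [pvRepl_cons_pos _ _ _ _ hp hpre]
        intro hcon
        -- s is a prefix of r ++ _, s nonempty, so s.head = '<' ∈ s
        cases s with
        | nil => exact hs rfl
        | cons s0 st =>
          cases r with
          | nil => simp at hr
          | cons r0 rt =>
            have : s0 = r0 := (List.cons_prefix_cons.mp hcon).1
            simp at hr
            exact hsl (by rw [hr] at this; exact this ▸ List.mem_cons_self)
      · rw [pvRepl_cons_neg _ _ _ _ hpre]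
        intro hcon
        cases s with
        | nil => exact hs rfl
        | cons s0 st =>
          rcases List.cons_prefix_cons.mp hcon with ⟨he, hst'⟩
          subst he
          by_cases hst0 : st = []
          · subst hst0
            exact hst (by simp)
          · have : ¬ st <+: t' := by
              intro h'
              exact hst (List.cons_prefix_cons.mpr ⟨rfl, h'⟩)
            have hn' : t'.length ≤ n := by simp at hn; omega
            have hd : (List.drop p.length t').length ≤ n := by
              simp [List.length_drop]; omega
            exact ih t' st hn' hst0 (fun h => hsl (List.mem_cons_of_mem _ h)) this hst'

theorem pvRepl_block (p r blk w : List Char) (hp : p.head? = some '<')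
    (hb1 : blk.head? = some '<') (hb2 : '<' ∉ blk.tail)
    (hn1 : ¬ p <+: blk) (hn2 : ¬ blk <+: p) :
    pvRepl p r (blk ++ w) = blk ++ pvRepl p r w := by
  have hnp : ¬ p <+: blk ++ w := by
    intro h
    rcases List.prefix_or_prefix_of_prefix h (List.prefix_append blk w) with h' | h'
    · exact hn1 h'
    · exact hn2 h'
  cases blk with
  | nil => simp at hb1
  | cons b bt =>
    simp at hb1
    subst hb1
    have hnp' : ¬ p <+: '<' :: (bt ++ w) := by simpa using hnp
    rw [List.cons_append, pvRepl_cons_neg _ _ _ _ hnp', pvRepl_skip p r hp bt w (by simpa using hb2)]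
    simp

theorem pvFoldBlock (tab : List (List Char × List Char)) (blk : List Char)
    (htab : ∀ q ∈ tab, q.1.head? = some '<' ∧ ¬ q.1 <+: blk ∧ ¬ blk <+: q.1)
    (hb1 : blk.head? = some '<') (hb2 : '<' ∉ blk.tail) :
    ∀ v, tab.foldl (fun s pr => pvRepl pr.1 pr.2 s) (blk ++ v)
       = blk ++ tab.foldl (fun s pr => pvRepl pr.1 pr.2 s) v := by
  induction tab with
  | nil => intro v; simp
  | cons q rest ih =>
    intro v
    rcases htab q List.mem_cons_self with ⟨h1, h2, h3⟩
    simp only [List.foldl_cons]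
    rw [pvRepl_block q.1 q.2 blk v h1 hb1 hb2 h2 h3]
    exact ih (fun q' hq' => htab q' (List.mem_cons_of_mem _ hq')) _


-- the sequential composition of all eleven replaces
def pvFold (l : List Char) : List Char :=
  pvTableB.foldl (fun s pr => pvRepl pr.1 pr.2 s) l

-- concrete facts about the table (patterns/replacements are literals)
theorem pvTab_shape : ∀ pr ∈ pvTableB,
    pr.1.head? = some '<' ∧ '<' ∉ pr.1.tail ∧ pr.2.head? = some '<' ∧ '<' ∉ pr.2.tail := by decide

theorem pvTab_rep : ∀ p ∈ pvTableB, ∀ q ∈ pvTableB, ¬ p.1 <+: q.2 ∧ ¬ q.2 <+: p.1 := by decide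

theorem pvTab_pair : ∀ p ∈ pvTableB, ∀ q ∈ pvTableB, p.1 ≠ q.1 → ¬ p.1 <+: q.1 := by decide

theorem pvTab_nodup : (pvTableB.map (·.1)).Nodup := by decide

-- when no pattern matches at the front, a whole fold of replaces steps over the first char
theorem pvFold_push_gen (tab : List (List Char × List Char))
    (htab : ∀ pr ∈ tab, 2 ≤ pr.1.length ∧ pr.1.head? = some '<' ∧ '<' ∉ pr.1.tail ∧
      pr.2.head? = some '<') :
    ∀ (c : Char) (t : List Char), (∀ pr ∈ tab, ¬ pr.1 <+: c :: t) →
      tab.foldl (fun s pr => pvRepl pr.1 pr.2 s) (c :: t)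
        = c :: tab.foldl (fun s pr => pvRepl pr.1 pr.2 s) t := by
  induction tab with
  | nil => intro c t _; simp
  | cons q rest ih =>
    intro c t hm
    rcases htab q List.mem_cons_self with ⟨hq1, hq2, _, hq4⟩
    have hqne : q.1 ≠ [] := by
      intro h; rw [h] at hq1; simp at hq1
    simp only [List.foldl_cons]
    rw [pvRepl_cons_neg _ _ _ _ (hm q List.mem_cons_self)]
    apply ih (fun q' hq' => htab q' (List.mem_cons_of_mem _ hq'))
    intro pr hpr hcon
    rcases htab pr (List.mem_cons_of_mem _ hpr) with ⟨hp1, hp2, hp3, _⟩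
    cases hpr1 : pr.1 with
    | nil => rw [hpr1] at hp2; simp at hp2
    | cons p0 pt =>
      rw [hpr1] at hp2; simp at hp2
      rw [hpr1] at hcon
      rcases List.cons_prefix_cons.mp hcon with ⟨hc, hpt⟩
      have hptne : pt ≠ [] := by
        intro h; rw [hpr1, h] at hp1; simp at hp1
      have hptl : '<' ∉ pt := by rw [hpr1] at hp3; simpa using hp3
      have hnt : ¬ pt <+: t := by
        intro h'
        exact hm pr (List.mem_cons_of_mem _ hpr)
          (by rw [hpr1, ← hc, hp2]; exact List.cons_prefix_cons.mpr ⟨rfl, h'⟩)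
      exact pvRepl_newhead q.1 q.2 hqne hq4 t.length t pt le_rfl hptne hptl hnt hpt

theorem pvFirst_none {l : List Char} {tab : List (List Char × List Char)}
    (h : pvFirst l tab = none) : ∀ pr ∈ tab, ¬ pr.1 <+: l := by
  induction tab with
  | nil => simp
  | cons q rest ih =>
    by_cases hq : q.1.isPrefixOf l
    · simp [pvFirst, hq] at h
    · simp [pvFirst, hq] at h
      intro pr hpr
      rcases List.mem_cons.mp hpr with h' | h'
      · subst h'
        intro hcon
        exact hq (List.isPrefixOf_iff_prefix.mpr hcon)
      · exact ih h pr h'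

-- pvRepl applied to its own pattern in front
theorem pvRepl_self (p r w : List Char) (hp : p ≠ []) :
    pvRepl p r (p ++ w) = r ++ pvRepl p r w := by
  cases p with
  | nil => exact absurd rfl hp
  | cons p0 pt =>
    rw [List.cons_append, pvRepl_cons_pos _ _ _ _ hp (by
      exact List.cons_prefix_cons.mpr ⟨rfl, List.prefix_append pt w⟩)]
    congr 1
    congr 1
    have h := (List.drop_left : List.drop (p0 :: pt).length (p0 :: pt ++ w) = w)
    simp only [List.cons_append] at h
    exact h

theorem pvFold_nil : pvFold [] = [] := by
  have : ∀ (tab : List (List Char × List Char)),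
      tab.foldl (fun s pr => pvRepl pr.1 pr.2 s) [] = [] := by
    intro tab
    induction tab with
    | nil => rfl
    | cons q rest ih => simp [pvRepl_nil]; exact ih
  exact this pvTableB

-- q.1 ≠ pr.1 for q left of pr in the (nodup-pattern) table
theorem pvTab_split_ne {pre post : List (List Char × List Char)}
    {pr : List Char × List Char} (hsplit : pvTableB = pre ++ pr :: post) :
    ∀ q ∈ pre, q.1 ≠ pr.1 := by
  intro q hq hcon
  have hnd := pvTab_nodup
  rw [hsplit] at hnd
  simp only [List.map_append, List.map_cons] at hnd
  rcases List.nodup_append.mp hnd with ⟨_, _, hdisj⟩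
  exact hdisj _ (List.mem_map_of_mem hq) _ (List.mem_cons_self) hcon

-- scan equations
theorem pvScan_nil : pvScan [] = [] := by rw [pvScan]

theorem pvScan_none (c : Char) (t : List Char) (h : pvFirst (c :: t) pvTableB = none) :
    pvScan (c :: t) = c :: pvScan t := by
  rw [pvScan]
  split
  · rename_i pr heq
    rw [h] at heq; cases heq
  · rfl

theorem pvScan_some (c : Char) (t : List Char) (pr : List Char × List Char)
    (h : pvFirst (c :: t) pvTableB = some pr) :
    pvScan (c :: t) = pr.2 ++ pvScan (List.drop pr.1.length (c :: t)) := by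
  rw [pvScan]
  split
  · rename_i pr' heq
    rw [h] at heq
    cases heq
    rfl
  · rename_i heq
    rw [h] at heq; cases heq

-- main: the eleven sequential replaces equal the single scan
theorem pvFold_eq_pvScan_aux : ∀ (n : Nat) (l : List Char), l.length ≤ n → pvFold l = pvScan l := by
  intro n
  induction n with
  | zero =>
    intro l hl
    have : l = [] := by cases l with | nil => rfl | cons _ _ => simp at hl
    subst this
    rw [pvFold_nil, pvScan_nil]
  | succ n ih =>
    intro l hl
    cases l with
    | nil => rw [pvFold_nil, pvScan_nil]
    | cons c t =>
      cases hf : pvFirst (c :: t) pvTableB with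
      | none =>
        have hpush := pvFold_push_gen pvTableB
          (fun pr hpr => ⟨pvTableB_pat_len pr hpr, (pvTab_shape pr hpr).1,
            (pvTab_shape pr hpr).2.1, (pvTab_shape pr hpr).2.2.1⟩)
          c t (pvFirst_none hf)
        have ht : t.length ≤ n := by simp at hl; omega
        rw [pvFold, hpush, show List.foldl (fun s pr => pvRepl pr.1 pr.2 s) t pvTableB = pvFold t from rfl, ih t ht, pvScan_none c t hf]
      | some pr =>
        rcases pvFirst_some hf with ⟨hmem, hpre⟩
        rcases List.append_of_mem hmem with ⟨pre, post, hsplit⟩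
        set v := List.drop pr.1.length (c :: t) with hv
        have hct : pr.1 ++ v = c :: t := List.prefix_iff_eq_append.mp hpre
        have hlen2 := pvTableB_pat_len pr hmem
        have hprne : pr.1 ≠ [] := by
          intro h; rw [h] at hlen2; simp at hlen2
        have hvlen : v.length ≤ n := by
          rw [hv]
          simp only [List.length_drop]
          simp at hl ⊢
          omega
        have hpreH : ∀ q ∈ pre, q.1.head? = some '<' ∧ ¬ q.1 <+: pr.1 ∧ ¬ pr.1 <+: q.1 := by
          intro q hq
          have hqmem : q ∈ pvTableB := by
            rw [hsplit]; exact List.mem_append_left _ hq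
          have hne := pvTab_split_ne hsplit q hq
          exact ⟨(pvTab_shape q hqmem).1,
            pvTab_pair q hqmem pr hmem hne,
            pvTab_pair pr hmem q hqmem (Ne.symm hne)⟩
        have hpostH : ∀ q ∈ post, q.1.head? = some '<' ∧ ¬ q.1 <+: pr.2 ∧ ¬ pr.2 <+: q.1 := by
          intro q hq
          have hqmem : q ∈ pvTableB := by
            rw [hsplit]
            exact List.mem_append_right _ (List.mem_cons_of_mem _ hq)
          exact ⟨(pvTab_shape q hqmem).1,
            (pvTab_rep q hqmem pr hmem).1, (pvTab_rep q hqmem pr hmem).2⟩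
        calc pvFold (c :: t)
            = (pre ++ pr :: post).foldl (fun s q => pvRepl q.1 q.2 s) (pr.1 ++ v) := by
              rw [pvFold, hsplit, hct]
          _ = (pr :: post).foldl (fun s q => pvRepl q.1 q.2 s)
                (pr.1 ++ pre.foldl (fun s q => pvRepl q.1 q.2 s) v) := by
              rw [List.foldl_append,
                pvFoldBlock pre pr.1 hpreH (pvTab_shape pr hmem).1 (pvTab_shape pr hmem).2.1 v]
          _ = post.foldl (fun s q => pvRepl q.1 q.2 s)
                (pr.2 ++ pvRepl pr.1 pr.2 (pre.foldl (fun s q => pvRepl q.1 q.2 s) v)) := by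
              rw [List.foldl_cons, pvRepl_self pr.1 pr.2 _ hprne]
          _ = pr.2 ++ pvFold v := by
              rw [pvFoldBlock post pr.2 hpostH (pvTab_shape pr hmem).2.2.1
                (pvTab_shape pr hmem).2.2.2]
              rw [pvFold, hsplit, List.foldl_append, List.foldl_cons]
          _ = pr.2 ++ pvScan v := by rw [ih v hvlen]
        rw [pvScan_some c t pr hf]

theorem pvFold_eq_pvScan (l : List Char) : pvFold l = pvScan l :=
  pvFold_eq_pvScan_aux l.length l le_rfl

-- A's fold of Str.replace, moved to the char-list side
theorem fold_replace_toList (ps : List (String × String)) :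
    ∀ (s : String),
      (ps.foldl (fun h ts => PySem.Str.replace h ("<" ++ ts.1 ++ ">")
          ("<" ++ ts.1 ++ " style=\"" ++ ts.2 ++ "\">")) s).toList
        = (ps.map (fun ts => (("<" ++ ts.1 ++ ">").toList,
            ("<" ++ ts.1 ++ " style=\"" ++ ts.2 ++ "\">").toList))).foldl
            (fun l pr => pvRepl pr.1 pr.2 l) s.toList := by
  induction ps with
  | nil => intro s; simp
  | cons q rest ih =>
    intro s
    simp only [List.foldl_cons, List.map_cons]
    rw [ih, PySem.Str.toList_replace,
      replace_eq_pvRepl _ _ _ (by simp [String.toList_append])]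

theorem a_toList (s : String) : (apply_inline_styles_py s).toList = pvFold s.toList := by
  rw [apply_inline_styles_py,
    show pvStylesA.items = pvStylesB from by decide,
    fold_replace_toList, pvFold, pvTableB]

-- ===== VERDICT (by name: the statement is the Claim_ definition above) =====
theorem apply_inline_styles_py_spec : Claim_equal_apply_inline_styles_py := by
  intro html _
  unfold Spec_apply_inline_styles_py
  apply String.toList_inj.mp
  rw [a_toList, pvFold_eq_pvScan]
  simp [apply_inline_styles_py_alt, String.toList_ofList]
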